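-- pv_equiv track=rewrite | github.com/htrbao/UIT_DSC2023 | module/data_loader.py | count_vocab
-- ===== SOURCE A (Python) =====
-- from collections import Counter
--
-- def count_vocab(examples):
--     vocab_count = Counter()
--     max_context, max_q = 0, 0
--     for example in examples:
--         context = example['c_document']
--         q = example['claim']
--         vocab_count.update(context)
--         vocab_count.update(q)
--
--         max_context = max(max_context, len(context))
--         max_q = max(max_q, len(q))
--
--     return vocab_count, (max_context + 1, max_q)
-- ===== SOURCE B (Python) =====
-- from collections import Counter
--
-- def count_vocab(examples):
--     # Per-example summaries, then a balanced pairwise reduction (merge rounds).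
--     parts = []
--     for ex in examples:
--         c = Counter(ex['c_document'])
--         c.update(ex['claim'])
--         parts.append((c, len(ex['c_document']), len(ex['claim'])))
--     if not parts:
--         return Counter(), (1, 0)
--     while len(parts) > 1:
--         nxt = []
--         for i in range(0, len(parts) - 1, 2):
--             c1, m1, q1 = parts[i]
--             c2, m2, q2 = parts[i + 1]
--             c1.update(c2)
--             nxt.append((c1, max(m1, m2), max(q1, q2)))
--         if len(parts) % 2:
--             nxt.append(parts[-1])
--         parts = nxt
--     vocab, max_context, max_q = parts[0]
--     return vocab, (max_context + 1, max_q)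
-- ===== Notes on version B (the rewrite author's own statement) =====
-- stated objective: alternative
-- what changed: Replaces A's single left-to-right fused accumulator loop with a map-reduce scheme: each example is first summarized independently into a (Counter, context length, claim length) triple, and the summaries are then combined by iterated balanced pairwise-merge rounds (a reduction tree) instead of being folded into one running accumulator.
import Mathlib
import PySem

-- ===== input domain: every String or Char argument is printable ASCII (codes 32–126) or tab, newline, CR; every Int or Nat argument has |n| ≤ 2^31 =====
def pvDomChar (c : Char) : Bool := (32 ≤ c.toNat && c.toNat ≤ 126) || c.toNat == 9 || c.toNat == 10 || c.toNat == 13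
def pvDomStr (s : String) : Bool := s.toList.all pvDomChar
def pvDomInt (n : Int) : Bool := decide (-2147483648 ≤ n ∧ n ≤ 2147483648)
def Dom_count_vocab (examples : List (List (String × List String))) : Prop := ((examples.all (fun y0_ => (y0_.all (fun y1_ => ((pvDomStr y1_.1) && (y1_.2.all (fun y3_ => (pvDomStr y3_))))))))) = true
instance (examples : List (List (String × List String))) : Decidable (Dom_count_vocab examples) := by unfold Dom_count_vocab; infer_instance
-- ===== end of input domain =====

-- B replaces A's fused accumulator loop by a map-reduce scheme: per-example summaries merged
-- by balanced pairwise reduction rounds; same cost class, different traversal structure.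
-- Pre_ excludes examples missing a 'c_document' or 'claim' key, on which Python A raises KeyError.


-- ===== PORT A =====
-- example['c_document'] / example['claim']; the key is present under Pre_, so getD [] is never the default
def pvCtx (ex : List (String × List String)) : List String :=
  ((PySem.Dict.mk ex).get? "c_document").getD []
def pvClm (ex : List (String × List String)) : List String :=
  ((PySem.Dict.mk ex).get? "claim").getD []

def count_vocab (examples : List (List (String × List String))) : (List (String × Int)) × (Int × Int) :=
  let st := examples.foldl
    (fun (st : PySem.Dict String Int × Int × Int) ex =>
      let context := pvCtx ex
      let q := pvClm ex
      let d1 := context.foldl (fun d t => d.modify t 0 (· + 1)) st.1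
      let d2 := q.foldl (fun d t => d.modify t 0 (· + 1)) d1
      (d2, max st.2.1 (context.length : Int), max st.2.2 (q.length : Int)))
    (PySem.Dict.empty, 0, 0)
  (st.1.items, (st.2.1 + 1, st.2.2))

-- ===== PORT B =====
-- c1.update(c2) for Counters: add c2's counts into c1 (new keys append in c2's order)
def pvMergeC (c1 c2 : PySem.Dict String Int) : PySem.Dict String Int :=
  c2.items.foldl (fun d kv => d.modify kv.1 0 (· + kv.2)) c1

-- one example's summary: (Counter of its tokens, len(context), len(claim))
def pvPart (ex : List (String × List String)) : PySem.Dict String Int × Int × Int :=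
  let context := pvCtx ex
  let q := pvClm ex
  let c := q.foldl (fun d t => d.modify t 0 (· + 1)) (PySem.Dict.counter context)
  (c, (context.length : Int), (q.length : Int))

-- one round of the while-loop: merge adjacent pairs, keep an odd leftover
def pvPairRound (ps : List (PySem.Dict String Int × Int × Int)) :
    List (PySem.Dict String Int × Int × Int) :=
  match ps with
  | p1 :: p2 :: rest =>
      (pvMergeC p1.1 p2.1, max p1.2.1 p2.2.1, max p1.2.2 p2.2.2) :: pvPairRound rest
  | rest => rest

theorem pvPairRound_length_le (ps : List (PySem.Dict String Int × Int × Int)) :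
    (pvPairRound ps).length ≤ ps.length := by
  induction ps using pvPairRound.induct with
  | case1 p1 p2 rest ih =>
    simp only [pvPairRound, List.length_cons]
    omega
  | case2 rest h => cases rest with
    | nil => simp [pvPairRound]
    | cons a t => cases t with
      | nil => simp [pvPairRound]
      | cons b t' => exact absurd rfl (h a b t')

-- the while-loop: repeat rounds until one part remains ([] branch is unreachable padding)
def pvReduce (ps : List (PySem.Dict String Int × Int × Int)) :
    PySem.Dict String Int × Int × Int :=
  match ps with
  | [] => (PySem.Dict.empty, 0, 0)
  | [p] => p
  | p1 :: p2 :: rest => pvReduce (pvPairRound (p1 :: p2 :: rest))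
termination_by ps.length
decreasing_by
  simp only [pvPairRound, List.length_cons]
  exact Nat.succ_lt_succ (Nat.lt_succ_of_le (pvPairRound_length_le rest))

def count_vocab_alt (examples : List (List (String × List String))) : (List (String × Int)) × (Int × Int) :=
  let parts := examples.map pvPart
  match parts with
  | [] => (PySem.Dict.empty.items, ((1 : Int), (0 : Int)))
  | p :: rest =>
      let r := pvReduce (p :: rest)
      (r.1.items, (r.2.1 + 1, r.2.2))

-- ===== PRECONDITION & SPEC =====
-- Pre_ excludes examples lacking a 'c_document' or 'claim' key: Python A (and B) raises KeyError there.
def Pre_count_vocab (examples : List (List (String × List String))) : Prop :=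
  ∀ ex ∈ examples, "c_document" ∈ ex.map Prod.fst ∧ "claim" ∈ ex.map Prod.fst
instance (examples : List (List (String × List String))) : Decidable (Pre_count_vocab examples) := by unfold Pre_count_vocab; infer_instance
def pvWitness_count_vocab : (List (List (String × List String))) :=
  [[("c_document", ["a", "b"]), ("claim", ["b"])]]

def Spec_count_vocab (examples : List (List (String × List String))) (out : (List (String × Int)) × (Int × Int)) : Prop := out = count_vocab_alt examples
instance (examples : List (List (String × List String))) (out : (List (String × Int)) × (Int × Int)) : Decidable (Spec_count_vocab examples out) := by unfold Spec_count_vocab; infer_instance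

-- ===== CLAIM (what is proved, stated in full; the proofs are below) =====
def Claim_equal_count_vocab : Prop := ∀ (examples : List (List (String × List String))), Dom_count_vocab examples → Pre_count_vocab examples → Spec_count_vocab examples (count_vocab examples)

-- ===== LEMMAS AND PROOFS =====

-- value of a merge-style fold over key/value pairs, pointwise
theorem pvGetD_addAll (kvs : List (String × Int)) (d : PySem.Dict String Int) (k : String) :
    (kvs.foldl (fun d kv => d.modify kv.1 0 (· + kv.2)) d).getD k 0
      = d.getD k 0 + ((kvs.filter (fun p => p.1 == k)).map (·.2)).sum := by
  induction kvs generalizing d with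
  | nil => simp
  | cons p rest ih =>
    simp only [List.foldl_cons, ih, PySem.Dict.getD_modify, List.filter_cons]
    by_cases h : p.1 = k
    · simp [h]
      ring
    · simp [h, Ne.symm h]

-- merging two Counters is the Counter of the concatenated token lists
theorem pvMergeC_counter (xs ys : List String) :
    pvMergeC (PySem.Dict.counter xs) (PySem.Dict.counter ys)
      = PySem.Dict.counter (xs ++ ys) := by
  apply PySem.Dict.ext
  have hnodupL : (pvMergeC (PySem.Dict.counter xs) (PySem.Dict.counter ys)).keys.Nodup := by
    exact PySem.Dict.nodup_keys_foldl_modify_key _ Prod.fst _ _ _ (PySem.Dict.nodup_keys_counter xs)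
  have hkeysL : (pvMergeC (PySem.Dict.counter xs) (PySem.Dict.counter ys)).keys
      = PySem.Set.ofList (xs ++ ys) := by
    unfold pvMergeC
    rw [PySem.Dict.keys_foldl_modify_key]
    have : (PySem.Dict.counter ys).items.map Prod.fst = (PySem.Dict.counter ys).keys := rfl
    rw [this, PySem.Dict.keys_counter, PySem.Dict.keys_counter, PySem.Set.ofList_append]
    rw [PySem.Set.update_eq_append_filter, PySem.Set.update_eq_append_filter,
        PySem.Set.ofList_ofList]
  have hgetD : ∀ k, (pvMergeC (PySem.Dict.counter xs) (PySem.Dict.counter ys)).getD k 0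
      = (PySem.Dict.counter (xs ++ ys)).getD k 0 := by
    intro k
    unfold pvMergeC
    rw [pvGetD_addAll, PySem.Dict.getD_counter, PySem.Dict.getD_counter,
        PySem.Dict.items_counter]
    have hfil : ((PySem.Set.ofList ys).map (fun k' => (k', (ys.count k' : Int)))).filter
          (fun p => p.1 == k)
        = ((PySem.Set.ofList ys).filter (fun k' => k' == k)).map
            (fun k' => (k', (ys.count k' : Int))) := by
      rw [List.filter_map]; rfl
    rw [hfil]
    by_cases hk : k ∈ ys
    · have hmem : k ∈ PySem.Set.ofList ys := (PySem.Set.mem_ofList _ _).2 hk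
      have : (PySem.Set.ofList ys).filter (fun k' => k' == k) = [k] := by
        have hn := PySem.Set.nodup_ofList (xs := ys)
        have hcount : (PySem.Set.ofList ys).count k = 1 := List.count_eq_one_of_mem hn hmem
        calc (PySem.Set.ofList ys).filter (fun k' => k' == k)
            = List.replicate ((PySem.Set.ofList ys).count k) k := by
              simpa using List.filter_beq (l := PySem.Set.ofList ys) k
          _ = [k] := by rw [hcount]; rfl
      rw [this]
      simp [List.count_append]
    · have hmem : k ∉ PySem.Set.ofList ys := fun h => hk ((PySem.Set.mem_ofList _ _).1 h)
      have : (PySem.Set.ofList ys).filter (fun k' => k' == k) = [] := by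
        apply List.filter_eq_nil_iff.2
        intro a ha hbeq
        have hak : a = k := by simpa using hbeq
        exact hmem (hak ▸ ha)
      rw [this]
      have : ys.count k = 0 := List.count_eq_zero.2 hk
      simp [List.count_append, this]
  rw [PySem.Dict.items_eq_map_keys _ hnodupL (0 : Int),
      PySem.Dict.items_eq_map_keys _ (PySem.Dict.nodup_keys_counter (xs ++ ys)) (0 : Int),
      hkeysL, PySem.Dict.keys_counter]
  exact List.map_congr_left (fun k _ => by rw [hgetD k])

-- abstract summaries: (token list, context length, claim length) with their realization
def pvAbs (x : List String × Nat × Nat) : PySem.Dict String Int × Int × Int :=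
  (PySem.Dict.counter x.1, (x.2.1 : Int), (x.2.2 : Int))

def pvPairA (l : List (List String × Nat × Nat)) : List (List String × Nat × Nat) :=
  match l with
  | x :: y :: rest => (x.1 ++ y.1, max x.2.1 y.2.1, max x.2.2 y.2.2) :: pvPairA rest
  | rest => rest

theorem pvPairRound_map_abs (l : List (List String × Nat × Nat)) :
    pvPairRound (l.map pvAbs) = (pvPairA l).map pvAbs := by
  induction l using pvPairA.induct with
  | case1 x y rest ih =>
    simp only [List.map_cons, pvPairRound, pvPairA, ih, pvAbs, pvMergeC_counter]
    simp [Nat.cast_max]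
  | case2 rest h =>
    cases rest with
    | nil => rfl
    | cons a t => cases t with
      | nil => rfl
      | cons b t' => exact absurd rfl (h a b t')

theorem pvPairA_flat (l : List (List String × Nat × Nat)) :
    (pvPairA l).flatMap (·.1) = l.flatMap (·.1) := by
  induction l using pvPairA.induct with
  | case1 x y rest ih => simp [pvPairA, ih, List.append_assoc]
  | case2 rest h => cases rest with
    | nil => rfl
    | cons a t => cases t with
      | nil => rfl
      | cons b t' => exact absurd rfl (h a b t')

theorem pvPairA_max1 (l : List (List String × Nat × Nat)) :
    ((pvPairA l).map (·.2.1)).foldr max 0 = (l.map (·.2.1)).foldr max 0 := by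
  induction l using pvPairA.induct with
  | case1 x y rest ih =>
    simp only [pvPairA, List.map_cons, List.foldr_cons, ih]
    exact Nat.max_assoc _ _ _
  | case2 rest h => cases rest with
    | nil => rfl
    | cons a t => cases t with
      | nil => rfl
      | cons b t' => exact absurd rfl (h a b t')

theorem pvPairA_max2 (l : List (List String × Nat × Nat)) :
    ((pvPairA l).map (·.2.2)).foldr max 0 = (l.map (·.2.2)).foldr max 0 := by
  induction l using pvPairA.induct with
  | case1 x y rest ih =>
    simp only [pvPairA, List.map_cons, List.foldr_cons, ih]
    exact Nat.max_assoc _ _ _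
  | case2 rest h => cases rest with
    | nil => rfl
    | cons a t => cases t with
      | nil => rfl
      | cons b t' => exact absurd rfl (h a b t')

theorem pvPairA_length_le (l : List (List String × Nat × Nat)) :
    (pvPairA l).length ≤ l.length := by
  induction l using pvPairA.induct with
  | case1 x y rest ih =>
    simp only [pvPairA, List.length_cons]
    omega
  | case2 rest h => cases rest with
    | nil => exact le_refl _
    | cons a t => cases t with
      | nil => exact le_refl _
      | cons b t' => exact absurd rfl (h a b t')

-- the reduction of nonempty abstract summaries: counter of all tokens, max of each length column
theorem pvReduce_char (l : List (List String × Nat × Nat)) (hne : l ≠ []) :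
    pvReduce (l.map pvAbs)
      = (PySem.Dict.counter (l.flatMap (·.1)),
         (((l.map (·.2.1)).foldr max 0 : Nat) : Int),
         (((l.map (·.2.2)).foldr max 0 : Nat) : Int)) := by
  induction hn : l.length using Nat.strong_induction_on generalizing l with
  | _ n ih =>
    match l, hne with
    | [x], _ =>
      simp [pvReduce, pvAbs]
    | x :: y :: rest, _ =>
      rw [List.map_cons, List.map_cons, pvReduce, ← List.map_cons, ← List.map_cons,
          pvPairRound_map_abs]
      have hlen : (pvPairA (x :: y :: rest)).length < n := by
        subst hn
        simp only [pvPairA, List.length_cons]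
        exact Nat.succ_lt_succ (Nat.lt_succ_of_le (pvPairA_length_le rest))
      have hne' : pvPairA (x :: y :: rest) ≠ [] := by simp [pvPairA]
      rw [ih _ hlen _ hne' rfl, pvPairA_flat, pvPairA_max1, pvPairA_max2]

-- A's fused loop, started from any state, is the three independent passes.
theorem count_vocab_loop_split (exs : List (List (String × List String)))
    (d : PySem.Dict String Int) (mc mq : Int) :
    exs.foldl
      (fun (st : PySem.Dict String Int × Int × Int) ex =>
        let context := pvCtx ex
        let q := pvClm ex
        let d1 := context.foldl (fun d t => d.modify t 0 (· + 1)) st.1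
        let d2 := q.foldl (fun d t => d.modify t 0 (· + 1)) d1
        (d2, max st.2.1 (context.length : Int), max st.2.2 (q.length : Int)))
      (d, mc, mq)
    = ((exs.flatMap (fun ex => pvCtx ex ++ pvClm ex)).foldl (fun d t => d.modify t 0 (· + 1)) d,
       exs.foldl (fun m ex => max m ((pvCtx ex).length : Int)) mc,
       exs.foldl (fun m ex => max m ((pvClm ex).length : Int)) mq) := by
  induction exs generalizing d mc mq with
  | nil => rfl
  | cons ex rest ih =>
    simp only [List.foldl_cons, List.flatMap_cons, List.foldl_append, ih]

-- an Int max-fold over Nat casts is the cast of the Nat foldr-max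
theorem pvFoldrMax_init (t : List Nat) (n a : Nat) :
    t.foldr max (max n a) = max a (t.foldr max n) := by
  induction t with
  | nil => exact Nat.max_comm n a
  | cons b t ih => simp only [List.foldr_cons, ih]; exact Nat.max_left_comm b a _

theorem pvFoldlMax_cast (l : List Nat) (n : Nat) :
    List.foldl (fun (m : Int) (x : Nat) => max m (x : Int)) (n : Int) l
      = ((l.foldr max n : Nat) : Int) := by
  induction l generalizing n with
  | nil => rfl
  | cons a t ih =>
    simp only [List.foldl_cons, List.foldr_cons, ← Nat.cast_max, ih, pvFoldrMax_init]

-- a per-example summary realizes the abstract summary of its token lists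
theorem pvPart_abs (ex : List (String × List String)) :
    pvPart ex = pvAbs (pvCtx ex ++ pvClm ex, (pvCtx ex).length, (pvClm ex).length) := by
  unfold pvPart pvAbs
  simp [PySem.Dict.counter_eq_foldl, List.foldl_append]

theorem count_vocab_spec_open (examples : List (List (String × List String))) :
    count_vocab examples = count_vocab_alt examples := by
  unfold count_vocab count_vocab_alt
  rw [count_vocab_loop_split]
  cases examples with
  | nil => rfl
  | cons e rest =>
    have hmap : (e :: rest).map pvPart
        = ((e :: rest).map (fun ex => (pvCtx ex ++ pvClm ex, (pvCtx ex).length, (pvClm ex).length))).map pvAbs := by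
      rw [List.map_map]
      exact List.map_congr_left (fun ex _ => pvPart_abs ex)
    have hstep := pvReduce_char
      ((e :: rest).map (fun ex => (pvCtx ex ++ pvClm ex, (pvCtx ex).length, (pvClm ex).length)))
      (by simp)
    simp only [List.map_cons] at hmap hstep
    simp only [List.map_cons]
    rw [hmap, hstep]
    refine Prod.ext ?_ (Prod.ext ?_ ?_)
    · simp [PySem.Dict.counter_eq_foldl, List.flatMap_map, List.flatMap_cons,
            List.foldl_append]
    · have h := pvFoldlMax_cast ((e :: rest).map (fun ex => (pvCtx ex).length)) 0
      rw [List.foldl_map] at h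
      simp only [Nat.cast_zero] at h
      show List.foldl (fun m ex => max m ((pvCtx ex).length : Int)) 0 (e :: rest) + 1 = _
      rw [h]
      simp only [List.map_cons, List.map_map]
      rfl
    · have h := pvFoldlMax_cast ((e :: rest).map (fun ex => (pvClm ex).length)) 0
      rw [List.foldl_map] at h
      simp only [Nat.cast_zero] at h
      show List.foldl (fun m ex => max m ((pvClm ex).length : Int)) 0 (e :: rest) = _
      rw [h]
      simp only [List.map_cons, List.map_map]
      rfl

-- ===== VERDICT (by name: the statement is the Claim_ definition above) =====
theorem count_vocab_spec : Claim_equal_count_vocab := by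
  intro examples _ _
  exact count_vocab_spec_open examples
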